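-- pv_equiv track=rewrite | github.com/cbastianM/AECODE-Final-Project- | Diff engine.py | diff_simple
-- ===== SOURCE A (Python) =====
-- def diff_simple(old_dict: dict, new_dict: dict) -> dict:
--     """Diff for nodes (no nested properties)."""
--     old_keys = set(old_dict.keys())
--     new_keys = set(new_dict.keys())
--     return {
--         "added": {k: new_dict[k] for k in new_keys - old_keys},
--         "removed": {k: old_dict[k] for k in old_keys - new_keys},
--         "unchanged": {k: new_dict[k] for k in old_keys & new_keys},
--     }
-- ===== SOURCE B (Python) =====
-- def diff_simple(old_dict: dict, new_dict: dict) -> dict: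
--     """Diff for nodes (no nested properties)."""
--     # One merged status map: old entries start tagged "removed"; the pass over
--     # new_dict overwrites shared keys to "unchanged" and appends fresh keys as
--     # "added".  A final pass demultiplexes the tagged entries into the result.
--     status = {}
--     for k, v in old_dict.items():
--         status[k] = ("removed", v)
--     for k, v in new_dict.items():
--         status[k] = ("unchanged", v) if k in status else ("added", v)
--     result = {"added": {}, "removed": {}, "unchanged": {}}
--     for k, (tag, v) in status.items():
--         result[tag][k] = v
--     return result
-- ===== Notes on version B (the rewrite author's own statement) =====
-- stated objective: alternative
-- what changed: Replaces set algebra over the key sets with a single merged status map: old entries are tagged 'removed', the pass over new_dict overwrites shared keys to 'unchanged' and appends fresh ones as 'added', and one demultiplexing pass distributes the tagged entries into the three result dicts.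
import Mathlib
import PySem

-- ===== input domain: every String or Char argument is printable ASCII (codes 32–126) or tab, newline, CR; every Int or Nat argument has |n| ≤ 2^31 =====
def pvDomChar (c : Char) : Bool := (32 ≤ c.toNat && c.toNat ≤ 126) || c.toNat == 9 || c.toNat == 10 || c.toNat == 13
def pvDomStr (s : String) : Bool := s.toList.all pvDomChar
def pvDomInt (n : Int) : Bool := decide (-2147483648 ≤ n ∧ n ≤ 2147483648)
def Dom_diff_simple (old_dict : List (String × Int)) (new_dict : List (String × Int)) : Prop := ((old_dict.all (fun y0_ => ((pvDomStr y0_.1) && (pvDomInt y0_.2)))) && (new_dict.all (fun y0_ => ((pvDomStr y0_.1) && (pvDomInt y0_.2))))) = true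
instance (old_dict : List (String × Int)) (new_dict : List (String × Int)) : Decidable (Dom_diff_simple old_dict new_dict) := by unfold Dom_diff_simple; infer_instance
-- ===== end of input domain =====

-- B replaces A's set algebra (difference/intersection of key sets) by one merged
-- status map (old entries tagged "removed", overwritten to "unchanged"/appended as
-- "added" by the pass over new_dict) plus a demultiplexing pass; equivalence is on
-- the returned value.

-- ===== PORT A =====
-- The Python builds the inner dicts by iterating Python sets (hash order); the result
-- is compared as a dict (order-insensitive), so the port fixes the deterministic
-- first-insertion order of PySem.Set for those iterations.
def diff_simple (old_dict : List (String × Int)) (new_dict : List (String × Int)) : List (String × List (String × Int)) :=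
  let old_keys : PySem.Set String := PySem.Set.ofList (old_dict.map (fun p => p.1))
  let new_keys : PySem.Set String := PySem.Set.ofList (new_dict.map (fun p => p.1))
  [("added", (PySem.Set.diff new_keys old_keys).map (fun k => (k, (PySem.Dict.mk new_dict).getD k 0))),
   ("removed", (PySem.Set.diff old_keys new_keys).map (fun k => (k, (PySem.Dict.mk old_dict).getD k 0))),
   ("unchanged", (PySem.Set.inter old_keys new_keys).map (fun k => (k, (PySem.Dict.mk new_dict).getD k 0)))]

-- ===== PORT B =====
def diff_simple_alt (old_dict : List (String × Int)) (new_dict : List (String × Int)) : List (String × List (String × Int)) :=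
  let status0 : PySem.Dict String (String × Int) :=
    old_dict.foldl (fun s p => s.insert p.1 ("removed", p.2)) PySem.Dict.empty
  let status : PySem.Dict String (String × Int) :=
    new_dict.foldl (fun s p =>
      s.insert p.1 (if s.contains p.1 then ("unchanged", p.2) else ("added", p.2))) status0
  let result : PySem.Dict String (PySem.Dict String Int) :=
    status.items.foldl (fun r q => r.modify q.2.1 PySem.Dict.empty (fun d => d.insert q.1 q.2.2))
      (PySem.Dict.mk [("added", PySem.Dict.empty), ("removed", PySem.Dict.empty), ("unchanged", PySem.Dict.empty)])
  result.items.map (fun q => (q.1, q.2.items))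

-- ===== PRECONDITION & SPEC =====
-- Pre_ excludes association lists with duplicate keys: such lists do not represent any
-- Python dict argument (a real dict has unique keys), and the ports' list-level values
-- there are accidental.
def Pre_diff_simple (old_dict : List (String × Int)) (new_dict : List (String × Int)) : Prop :=
  (old_dict.map Prod.fst).Nodup ∧ (new_dict.map Prod.fst).Nodup
instance (old_dict : List (String × Int)) (new_dict : List (String × Int)) : Decidable (Pre_diff_simple old_dict new_dict) := by unfold Pre_diff_simple; infer_instance
def pvWitness_diff_simple : (List (String × Int)) × (List (String × Int)) :=
  ([("a", 1), ("b", 2)], [("b", 5), ("c", 7)])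

def Spec_diff_simple (old_dict : List (String × Int)) (new_dict : List (String × Int)) (out : List (String × List (String × Int))) : Prop := out = diff_simple_alt old_dict new_dict
instance (old_dict : List (String × Int)) (new_dict : List (String × Int)) (out : List (String × List (String × Int))) : Decidable (Spec_diff_simple old_dict new_dict out) := by unfold Spec_diff_simple; infer_instance

-- ===== CLAIM (what is proved, stated in full; the proofs are below) =====
def Claim_equal_diff_simple : Prop := ∀ (old_dict : List (String × Int)) (new_dict : List (String × Int)), Dom_diff_simple old_dict new_dict → Pre_diff_simple old_dict new_dict → Spec_diff_simple old_dict new_dict (diff_simple old_dict new_dict)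

-- ===== LEMMAS AND PROOFS =====

-- the entry a key of old_dict holds in the status map once the second loop is done
def Gfun (new_dict : List (String × Int)) : (String × Int) → String × (String × Int) :=
  fun p => match (PySem.Dict.mk new_dict).get? p.1 with
    | some w => (p.1, ("unchanged", w))
    | none => (p.1, ("removed", p.2))

theorem Gfun_fst (new_dict : List (String × Int)) (p : String × Int) :
    (Gfun new_dict p).1 = p.1 := by
  unfold Gfun; split <;> rfl

-- the common normal form both ports are reduced to
def targetForm (old_dict : List (String × Int)) (new_dict : List (String × Int)) : List (String × List (String × Int)) :=
  [("added", new_dict.filter (fun p => !(PySem.Dict.mk old_dict).contains p.1)),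
   ("removed", old_dict.filter (fun p => ((PySem.Dict.mk new_dict).get? p.1).isNone)),
   ("unchanged", (old_dict.filter (fun p => ((PySem.Dict.mk new_dict).get? p.1).isSome)).map
      (fun p => (p.1, (PySem.Dict.mk new_dict).getD p.1 0)))]

-- B's second loop: inserting each new pair overwrites a present key's entry in place
-- with the tag "unchanged" and appends a fresh key with the tag "added".
theorem status_loop :
    ∀ (l : List (String × Int)) (d : PySem.Dict String (String × Int)),
      (l.map Prod.fst).Nodup → d.keys.Nodup →
      (l.foldl (fun s p =>
          s.insert p.1 (if s.contains p.1 then ("unchanged", p.2) else ("added", p.2))) d).items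
      = d.items.map (fun q => match (PySem.Dict.mk l).get? q.1 with
          | some w => (q.1, ("unchanged", w))
          | none => q)
        ++ (l.filter (fun p => !d.contains p.1)).map (fun p => (p.1, ("added", p.2))) := by
  intro l
  induction l with
  | nil => intro d _ _; simp [PySem.Dict.get?, List.find?]
  | cons hd tl ih =>
    obtain ⟨hk, hv⟩ := hd
    intro d hnd hdk
    have hnd' : (tl.map Prod.fst).Nodup := (List.nodup_cons.mp (by simpa using hnd)).2
    have hknot : hk ∉ tl.map Prod.fst := (List.nodup_cons.mp (by simpa using hnd)).1
    have hget_tl_none : (PySem.Dict.mk tl).get? hk = none := by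
      rw [PySem.Dict.get?_eq_none_iff_not_mem_keys]
      simpa [PySem.Dict.keys] using hknot
    rw [List.foldl_cons]
    by_cases hc : d.contains hk = true
    · simp only [if_pos hc]
      have hdk' : (d.insert hk ("unchanged", hv)).keys.Nodup := by
        rw [PySem.Dict.keys_insert_of_contains _ _ hc]; exact hdk
      rw [ih _ hnd' hdk']
      congr 1
      · rw [PySem.Dict.items_insert_of_contains _ _ hc, List.map_map]
        apply List.map_congr_left
        intro q hq
        by_cases hq1 : q.1 = hk
        · simp [Function.comp, hq1, hget_tl_none, PySem.Dict.get?_mk_cons]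
        · simp [Function.comp, PySem.Dict.get?_mk_cons,
            show (q.1 == hk) = false from beq_eq_false_iff_ne.mpr hq1,
            show (hk == q.1) = false from beq_eq_false_iff_ne.mpr (Ne.symm hq1)]
      · rw [List.filter_cons]
        simp only [hc, Bool.not_true, Bool.false_eq_true, if_false]
        apply congrArg
        apply List.filter_congr
        intro p hp
        have hp1 : p.1 ≠ hk := fun h => hknot (h ▸ List.mem_map_of_mem hp)
        rw [PySem.Dict.contains_insert]
        simp [show (p.1 == hk) = false from beq_eq_false_iff_ne.mpr hp1]
    · simp only [if_neg hc]
      simp only [Bool.not_eq_true] at hc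
      have hkey : hk ∉ d.keys := by
        rw [← PySem.Dict.contains_iff_mem_keys]; simp [hc]
      have hdk' : (d.insert hk ("added", hv)).keys.Nodup := by
        rw [PySem.Dict.keys_insert_of_not_contains _ _ hc]
        simp only [List.nodup_append]
        refine ⟨hdk, List.nodup_singleton _, ?_⟩
        intro a ha b hb h
        simp only [List.mem_singleton] at hb
        exact hkey ((hb ▸ h) ▸ ha)
      rw [ih _ hnd' hdk']
      rw [PySem.Dict.items_insert_of_not_contains _ _ hc, List.map_append]
      have hmap : d.items.map (fun q => match (PySem.Dict.mk tl).get? q.1 with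
          | some w => (q.1, ("unchanged", w)) | none => q)
          = d.items.map (fun q => match (PySem.Dict.mk ((hk, hv) :: tl)).get? q.1 with
          | some w => (q.1, ("unchanged", w)) | none => q) := by
        apply List.map_congr_left
        intro q hq
        have hq1 : q.1 ≠ hk := by
          intro h
          exact hkey (h ▸ (by simpa [PySem.Dict.keys] using List.mem_map_of_mem (f := Prod.fst) hq))
        simp [PySem.Dict.get?_mk_cons,
          show (hk == q.1) = false from beq_eq_false_iff_ne.mpr (Ne.symm hq1)]
      rw [hmap]
      rw [List.filter_cons]
      simp only [hc, Bool.not_false, if_true]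
      have hfil : tl.filter (fun p => !(d.insert hk ("added", hv)).contains p.1)
          = tl.filter (fun p => !d.contains p.1) := by
        apply List.filter_congr
        intro p hp
        have hp1 : p.1 ≠ hk := fun h => hknot (h ▸ List.mem_map_of_mem hp)
        rw [PySem.Dict.contains_insert]
        simp [show (p.1 == hk) = false from beq_eq_false_iff_ne.mpr hp1]
      rw [hfil]
      simp [PySem.Dict.get?_mk_cons, hget_tl_none, List.map_cons]


-- B's dispatch loop splits the status entries by tag into the three slots of the
-- result dict, in place.
theorem dispatch_loop :
    ∀ (l : List (String × (String × Int))) (ia ir iu : PySem.Dict String Int),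
      (∀ q ∈ l, q.2.1 = "added" ∨ q.2.1 = "removed" ∨ q.2.1 = "unchanged") →
      l.foldl (fun r q => r.modify q.2.1 PySem.Dict.empty (fun d => d.insert q.1 q.2.2))
        (PySem.Dict.mk [("added", ia), ("removed", ir), ("unchanged", iu)])
      = PySem.Dict.mk
          [("added", (l.filter (fun q => q.2.1 == "added")).foldl (fun d q => d.insert q.1 q.2.2) ia),
           ("removed", (l.filter (fun q => q.2.1 == "removed")).foldl (fun d q => d.insert q.1 q.2.2) ir),
           ("unchanged", (l.filter (fun q => q.2.1 == "unchanged")).foldl (fun d q => d.insert q.1 q.2.2) iu)] := by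
  intro l
  induction l with
  | nil => intro ia ir iu _; simp
  | cons hd tl ih =>
    intro ia ir iu htags
    have htl : ∀ q ∈ tl, q.2.1 = "added" ∨ q.2.1 = "removed" ∨ q.2.1 = "unchanged" :=
      fun q hq => htags q (List.mem_cons_of_mem _ hq)
    rw [List.foldl_cons]
    rcases htags hd (List.mem_cons_self) with h | h | h
    · have hstep : (PySem.Dict.mk [("added", ia), ("removed", ir), ("unchanged", iu)]).modify hd.2.1 PySem.Dict.empty (fun d => d.insert hd.1 hd.2.2)
          = PySem.Dict.mk [("added", ia.insert hd.1 hd.2.2), ("removed", ir), ("unchanged", iu)] := by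
        rw [h]; simp [PySem.Dict.modify, PySem.Dict.insert, PySem.Dict.getD, PySem.Dict.get?, PySem.Dict.contains, List.find?]
      rw [hstep, ih _ _ _ htl]
      simp [h]
    · have hstep : (PySem.Dict.mk [("added", ia), ("removed", ir), ("unchanged", iu)]).modify hd.2.1 PySem.Dict.empty (fun d => d.insert hd.1 hd.2.2)
          = PySem.Dict.mk [("added", ia), ("removed", ir.insert hd.1 hd.2.2), ("unchanged", iu)] := by
        rw [h]; simp [PySem.Dict.modify, PySem.Dict.insert, PySem.Dict.getD, PySem.Dict.get?, PySem.Dict.contains, List.find?]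
      rw [hstep, ih _ _ _ htl]
      simp [h]
    · have hstep : (PySem.Dict.mk [("added", ia), ("removed", ir), ("unchanged", iu)]).modify hd.2.1 PySem.Dict.empty (fun d => d.insert hd.1 hd.2.2)
          = PySem.Dict.mk [("added", ia), ("removed", ir), ("unchanged", iu.insert hd.1 hd.2.2)] := by
        rw [h]; simp [PySem.Dict.modify, PySem.Dict.insert, PySem.Dict.getD, PySem.Dict.get?, PySem.Dict.contains, List.find?]
      rw [hstep, ih _ _ _ htl]
      simp [h]


-- A's per-key lookup map over filtered keys equals the filtered pair list
theorem map_lookup_filter (l : List (String × Int)) (c : String × Int → Bool)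
    (hnd : (l.map Prod.fst).Nodup) :
    ((l.filter c).map (fun p => (p.1, (PySem.Dict.mk l).getD p.1 0))) = l.filter c := by
  have h : ∀ p ∈ l.filter c, (p.1, (PySem.Dict.mk l).getD p.1 0) = p := by
    intro p hp
    have hmem : p ∈ l := List.mem_of_mem_filter hp
    have : (PySem.Dict.mk l).getD p.1 0 = p.2 := by
      apply PySem.Dict.getD_of_mem_items (PySem.Dict.mk l) (k := p.1) (v := p.2)
      · simpa using hmem
      · simpa [PySem.Dict.keys] using hnd
    rw [this]
  rw [List.map_congr_left h]
  simp

-- a fold that inserts fresh distinct keys into an empty dict just lists the pairs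
theorem fold_items_of_part (l : List (String × (String × Int)))
    (hnd : (l.map (fun q => q.1)).Nodup) :
    (l.foldl (fun d q => d.insert q.1 q.2.2) (PySem.Dict.empty : PySem.Dict String Int)).items
    = l.map (fun q => (q.1, q.2.2)) := by
  rw [PySem.Dict.items_foldl_insert_fresh l (fun q => q.1) (fun q => q.2.2) _
    (fun a _ => PySem.Dict.contains_empty _) hnd]
  simp [PySem.Dict.empty]

theorem nodup_keys_filter_map (l : List (String × Int)) (c : String × Int → Bool)
    (f : (String × Int) → String × (String × Int)) (hf : ∀ p, (f p).1 = p.1)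
    (h : (l.map (fun p => p.1)).Nodup) :
    (((l.filter c).map f).map (fun q => q.1)).Nodup := by
  rw [List.map_map, show ((fun q : String × (String × Int) => q.1) ∘ f) = (fun p : String × Int => p.1) from funext hf]
  exact ((List.filter_sublist (l := l) (p := c)).map _).nodup h

theorem filter_G_added (old_dict new_dict : List (String × Int)) :
    (old_dict.map (Gfun new_dict)).filter (fun q => q.2.1 == "added") = [] := by
  rw [List.filter_eq_nil_iff]
  intro q hq
  obtain ⟨p, hp, rfl⟩ := List.mem_map.mp hq
  unfold Gfun
  cases hg : (PySem.Dict.mk new_dict).get? p.1 <;> simp_all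

theorem filter_G_removed (old_dict new_dict : List (String × Int)) :
    (old_dict.map (Gfun new_dict)).filter (fun q => q.2.1 == "removed")
    = (old_dict.filter (fun p => ((PySem.Dict.mk new_dict).get? p.1).isNone)).map (Gfun new_dict) := by
  rw [List.filter_map]
  congr 1
  apply List.filter_congr
  intro p _
  unfold Gfun
  cases hg : (PySem.Dict.mk new_dict).get? p.1 <;> simp [hg]

theorem filter_G_unchanged (old_dict new_dict : List (String × Int)) :
    (old_dict.map (Gfun new_dict)).filter (fun q => q.2.1 == "unchanged")
    = (old_dict.filter (fun p => ((PySem.Dict.mk new_dict).get? p.1).isSome)).map (Gfun new_dict) := by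
  rw [List.filter_map]
  congr 1
  apply List.filter_congr
  intro p _
  unfold Gfun
  cases hg : (PySem.Dict.mk new_dict).get? p.1 <;> simp [hg]

theorem filter_added_part (new_dict : List (String × Int)) (c : String × Int → Bool) (t : String)
    (h : t ≠ "added") :
    ((new_dict.filter c).map (fun p => (p.1, (("added" : String), p.2)))).filter (fun q => q.2.1 == t) = [] := by
  rw [List.filter_eq_nil_iff]
  intro q hq
  obtain ⟨p, hp, rfl⟩ := List.mem_map.mp hq
  simpa using fun hh => h hh.symm

theorem filter_added_part_self (new_dict : List (String × Int)) (c : String × Int → Bool) :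
    ((new_dict.filter c).map (fun p => (p.1, (("added" : String), p.2)))).filter (fun q => q.2.1 == "added")
    = (new_dict.filter c).map (fun p => (p.1, (("added" : String), p.2))) := by
  rw [List.filter_eq_self]
  intro q hq
  obtain ⟨p, hp, rfl⟩ := List.mem_map.mp hq
  simp

theorem alt_eq (old_dict new_dict : List (String × Int))
    (ho : (old_dict.map Prod.fst).Nodup) (hn : (new_dict.map Prod.fst).Nodup) :
    diff_simple_alt old_dict new_dict = targetForm old_dict new_dict := by
  have hoF : (old_dict.map (fun p : String × Int => p.1)).Nodup := by simpa using ho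
  -- the first loop: fresh distinct keys simply append
  have h1i : (old_dict.foldl (fun s p => s.insert p.1 ("removed", p.2))
      (PySem.Dict.empty : PySem.Dict String (String × Int))).items
      = old_dict.map (fun p => (p.1, (("removed" : String), p.2))) := by
    rw [PySem.Dict.items_foldl_insert_fresh old_dict (fun p => p.1)
      (fun p => (("removed" : String), p.2)) PySem.Dict.empty
      (fun a _ => PySem.Dict.contains_empty _) hoF]
    simp [PySem.Dict.empty]
  have h1k : (old_dict.foldl (fun s p => s.insert p.1 ("removed", p.2))
      (PySem.Dict.empty : PySem.Dict String (String × Int))).keys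
      = old_dict.map (fun p => p.1) := by
    rw [PySem.Dict.keys_foldl_insert_key old_dict (fun p => p.1)
      (fun _ p => (("removed" : String), p.2)) PySem.Dict.empty]
    rw [show (PySem.Dict.empty : PySem.Dict String (String × Int)).keys = ([] : List String) from rfl,
      PySem.Set.update_nil_left, PySem.Set.ofList_eq_self_of_nodup _ hoF]
  have h1n : (old_dict.foldl (fun s p => s.insert p.1 ("removed", p.2))
      (PySem.Dict.empty : PySem.Dict String (String × Int))).keys.Nodup := by
    rw [h1k]; exact hoF
  -- the second loop, characterised by status_loop
  have h2 := status_loop new_dict _ hn h1n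
  rw [h1i, List.map_map] at h2
  have hcomp : ((fun q : String × (String × Int) =>
        match (PySem.Dict.mk new_dict).get? q.1 with
        | some w => (q.1, (("unchanged" : String), w))
        | none => q) ∘ (fun p : String × Int => (p.1, (("removed" : String), p.2))))
      = Gfun new_dict := by
    funext p
    simp only [Function.comp]
    unfold Gfun
    cases hg : (PySem.Dict.mk new_dict).get? p.1 <;> simp_all
  rw [hcomp] at h2
  have h1c : ∀ x, (old_dict.foldl (fun s p => s.insert p.1 ("removed", p.2))
      (PySem.Dict.empty : PySem.Dict String (String × Int))).contains x
      = (PySem.Dict.mk old_dict).contains x := by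
    intro x
    rw [PySem.Dict.contains_eq_decide_mem_keys, PySem.Dict.contains_eq_decide_mem_keys, h1k]
    simp [PySem.Dict.keys]
  simp only [h1c] at h2
  have htags : ∀ q ∈ old_dict.map (Gfun new_dict)
      ++ (new_dict.filter (fun p => !(PySem.Dict.mk old_dict).contains p.1)).map
          (fun p => (p.1, (("added" : String), p.2))),
      q.2.1 = "added" ∨ q.2.1 = "removed" ∨ q.2.1 = "unchanged" := by
    intro q hq
    rcases List.mem_append.mp hq with h | h
    · obtain ⟨p, hp, rfl⟩ := List.mem_map.mp h
      unfold Gfun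
      cases hg : (PySem.Dict.mk new_dict).get? p.1 <;> simp_all
    · obtain ⟨p, hp, rfl⟩ := List.mem_map.mp h
      left; rfl
  unfold diff_simple_alt
  simp only []
  rw [h2, dispatch_loop _ _ _ _ htags]
  rw [List.filter_append, List.filter_append, List.filter_append]
  rw [filter_G_added, filter_G_removed, filter_G_unchanged,
    filter_added_part_self,
    filter_added_part _ _ _ (by decide), filter_added_part _ _ _ (by decide)]
  simp only [List.nil_append, List.append_nil]
  simp only [List.map_cons, List.map_nil]
  rw [fold_items_of_part _ (by
      rw [List.map_map]
      exact ((List.filter_sublist (l := new_dict)).map _).nodup (by simpa using hn)),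
    fold_items_of_part _ (nodup_keys_filter_map _ _ _ (Gfun_fst new_dict) hoF),
    fold_items_of_part _ (nodup_keys_filter_map _ _ _ (Gfun_fst new_dict) hoF)]
  unfold targetForm
  simp only [List.map_map, List.cons.injEq, Prod.mk.injEq, true_and, and_true]
  refine ⟨?_, ?_, ?_⟩
  · rw [List.map_congr_left (g := id) ?_, List.map_id]
    intro p _
    rfl
  · rw [List.map_congr_left (g := id) ?_, List.map_id]
    intro p hp
    have hg : (PySem.Dict.mk new_dict).get? p.1 = none :=
      Option.isNone_iff_eq_none.mp (List.mem_filter.mp hp).2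
    simp [Function.comp, Gfun, hg]
  · apply List.map_congr_left
    intro p hp
    obtain ⟨w, hg⟩ := Option.isSome_iff_exists.mp (List.mem_filter.mp hp).2
    simp [Function.comp, Gfun, hg, PySem.Dict.getD_eq_get?_getD]
  
theorem a_eq (old_dict new_dict : List (String × Int))
    (ho : (old_dict.map Prod.fst).Nodup) (hn : (new_dict.map Prod.fst).Nodup) :
    diff_simple old_dict new_dict = targetForm old_dict new_dict := by
  unfold diff_simple
  simp only [PySem.Set.diff, PySem.Set.inter,
    PySem.Set.ofList_eq_self_of_nodup _ ho, PySem.Set.ofList_eq_self_of_nodup _ hn]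
  rw [show (List.filter (fun x => !PySem.Set.contains (old_dict.map Prod.fst) x) (new_dict.map Prod.fst))
        = (new_dict.filter (fun p => !(PySem.Dict.mk old_dict).contains p.1)).map Prod.fst from by
      rw [List.filter_map]; congr 1; apply List.filter_congr; intro p _
      rw [Bool.eq_iff_iff]
      simp [PySem.Set.contains, PySem.Dict.contains]
      aesop]
  rw [show (List.filter (fun x => !PySem.Set.contains (new_dict.map Prod.fst) x) (old_dict.map Prod.fst))
        = (old_dict.filter (fun p => !(PySem.Dict.mk new_dict).contains p.1)).map Prod.fst from by
      rw [List.filter_map]; congr 1; apply List.filter_congr; intro p _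
      rw [Bool.eq_iff_iff]
      simp [PySem.Set.contains, PySem.Dict.contains]
      aesop]
  rw [show (List.filter (fun x => PySem.Set.contains (new_dict.map Prod.fst) x) (old_dict.map Prod.fst))
        = (old_dict.filter (fun p => (PySem.Dict.mk new_dict).contains p.1)).map Prod.fst from by
      rw [List.filter_map]; congr 1; apply List.filter_congr; intro p _
      rw [Bool.eq_iff_iff]
      simp [PySem.Set.contains, PySem.Dict.contains]]
  simp only [List.map_map]
  rw [show ((fun k => (k, (PySem.Dict.mk new_dict).getD k 0)) ∘ Prod.fst)
        = (fun p : String × Int => (p.1, (PySem.Dict.mk new_dict).getD p.1 0)) from rfl,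
      show ((fun k => (k, (PySem.Dict.mk old_dict).getD k 0)) ∘ Prod.fst)
        = (fun p : String × Int => (p.1, (PySem.Dict.mk old_dict).getD p.1 0)) from rfl]
  rw [map_lookup_filter new_dict _ hn, map_lookup_filter old_dict _ ho]
  unfold targetForm
  rw [show (fun p : String × Int => !(PySem.Dict.mk new_dict).contains p.1)
        = (fun p => ((PySem.Dict.mk new_dict).get? p.1).isNone) from funext fun p => by
      rw [PySem.Dict.contains_eq_isSome_get?]
      cases (PySem.Dict.mk new_dict).get? p.1 <;> rfl,
      show (fun p : String × Int => (PySem.Dict.mk new_dict).contains p.1)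
        = (fun p => ((PySem.Dict.mk new_dict).get? p.1).isSome) from funext fun p =>
      PySem.Dict.contains_eq_isSome_get? _ _]

-- ===== VERDICT (by name: the statement is the Claim_ definition above) =====
theorem diff_simple_spec : Claim_equal_diff_simple := by
  intro old_dict new_dict _ hpre
  obtain ⟨ho, hn⟩ := hpre
  unfold Spec_diff_simple
  rw [a_eq _ _ ho hn, alt_eq _ _ ho hn]
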